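-- pv_equiv track=rewrite | github.com/khanukov/p-np2 | archive/experiments/lemma_b_search.py | all_functions
-- ===== SOURCE A (Python) =====
-- def variables(n):
--     """Return list of truth tables for variables x0..x_{n-1}."""
--     tables = []
--     for i in range(n):
--         table = 0
--         for x in range(1 << n):
--             bit = (x >> i) & 1
--             table |= bit << x
--         tables.append(table)
--     return tables
--
-- def const_table(n, value):
--     table = 0
--     if value:
--         table = (1 << (1 << n)) - 1
--     return table
--
-- def all_functions(n, max_gates):
--     """Return set of truth tables computed by circuits with <= max_gates."""
--     base = set(variables(n)) | {const_table(n, 0), const_table(n, 1)}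
--     layers = [base]
--     all_funcs = set(base)
--     for g in range(1, max_gates + 1):
--         new_set = set()
--         # unary NOT from previous layer
--         for f in layers[-1]:
--             mask = (1 << (1 << n)) - 1
--             new_set.add(mask ^ f)
--         # binary AND/OR combining smaller circuits
--         for i in range(g):
--             for f1 in layers[i]:
--                 for f2 in layers[g - 1 - i]:
--                     new_set.add(f1 & f2)
--                     new_set.add(f1 | f2)
--         layers.append(new_set)
--         all_funcs.update(new_set)
--     return all_funcs
-- ===== SOURCE B (Python) =====
-- def variables(n):
--     """Return list of truth tables for variables x0..x_{n-1}."""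
--     tables = []
--     for i in range(n):
--         table = 0
--         for x in range(1 << n):
--             bit = (x >> i) & 1
--             table |= bit << x
--         tables.append(table)
--     return tables
--
-- def const_table(n, value):
--     table = 0
--     if value:
--         table = (1 << (1 << n)) - 1
--     return table
--
-- def all_functions(n, max_gates):
--     """Return set of truth tables computed by circuits with <= max_gates."""
--     memo = {}
--
--     def layer(g):
--         """Set of truth tables of circuits using exactly g gates."""
--         if g in memo:
--             return memo[g]
--         if g == 0:
--             result = set(variables(n)) | {const_table(n, 0), const_table(n, 1)}
--         else:
--             mask = (1 << (1 << n)) - 1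
--             result = {mask ^ f for f in layer(g - 1)}
--             for i in range(g):
--                 for f1 in layer(i):
--                     for f2 in layer(g - 1 - i):
--                         result.add(f1 & f2)
--                         result.add(f1 | f2)
--         memo[g] = result
--         return result
--
--     all_funcs = set(layer(0))
--     for g in range(1, max_gates + 1):
--         all_funcs |= layer(g)
--     return all_funcs
-- ===== Notes on version B (the rewrite author's own statement) =====
-- stated objective: alternative
-- what changed: Replaced the bottom-up loop that carries an explicit list of layers (indexed with layers[-1], layers[i], layers[g-1-i]) by a memoized top-down recursion layer(g) over the gate budget, with the result the union of layer(0)..layer(max_gates); no layers list is maintained.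
import Mathlib
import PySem

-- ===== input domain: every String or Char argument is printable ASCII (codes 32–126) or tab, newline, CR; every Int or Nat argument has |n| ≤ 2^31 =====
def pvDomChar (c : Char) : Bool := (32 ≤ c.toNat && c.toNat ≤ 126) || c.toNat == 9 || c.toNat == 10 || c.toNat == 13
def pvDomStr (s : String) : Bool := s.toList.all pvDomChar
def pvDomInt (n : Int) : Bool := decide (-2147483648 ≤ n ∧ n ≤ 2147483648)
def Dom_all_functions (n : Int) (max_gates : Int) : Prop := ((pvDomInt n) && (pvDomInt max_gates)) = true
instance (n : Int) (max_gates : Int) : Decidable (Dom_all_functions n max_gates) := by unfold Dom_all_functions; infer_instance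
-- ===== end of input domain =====

-- B restates the gate-budget DP as a memoized top-down recursion layer(g) instead of A's
-- bottom-up loop carrying an explicit list of layers; same set contents, different decomposition.

-- ===== PORT A =====
-- helpers variables/const_table are textually identical in Source A and Source B; ported once, used by both ports.
-- shifts: the shift amounts n, x, 1<<n are nonnegative on Pre_ (0 ≤ n); .toNat is exact there.
def pyVariables (n : Int) : List Int :=
  (PySem.List.pyRange 0 n 1).foldl (fun tables i =>
    tables ++ [(PySem.List.pyRange 0 ((1 : Int) <<< n.toNat) 1).foldl
      (fun table x => PySem.Int.bor table ((PySem.Int.band (x >>> i.toNat) 1) <<< x.toNat))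
      0]) []

def pyConstTable (n : Int) (value : Bool) : Int :=
  if value then ((1 : Int) <<< ((1 : Int) <<< n.toNat).toNat) - 1 else 0

def pyBase (n : Int) : PySem.Set Int :=
  PySem.Set.union (PySem.Set.ofList (pyVariables n))
    (PySem.Set.ofList [pyConstTable n false, pyConstTable n true])

def all_functions (n : Int) (max_gates : Int) : List Int :=
  let base := pyBase n
  let st := (PySem.List.pyRange 1 (max_gates + 1) 1).foldl
    (fun (st : List (PySem.Set Int) × PySem.Set Int) g =>
      let layers := st.1
      -- layers is always nonempty, so layers[-1] never raises; the default is never used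
      let prev := (PySem.List.pyGet? layers (-1)).getD PySem.Set.empty
      let new1 := prev.foldl
        (fun s f => PySem.Set.add s
          (PySem.Int.bxor (((1 : Int) <<< ((1 : Int) <<< n.toNat).toNat) - 1) f))
        PySem.Set.empty
      let news := (PySem.List.pyRange 0 g 1).foldl (fun s i =>
          -- 0 ≤ i < g = len(layers): these indexings never raise, the default is never used
          let l1 := (PySem.List.pyGet? layers i).getD PySem.Set.empty
          let l2 := (PySem.List.pyGet? layers (g - 1 - i)).getD PySem.Set.empty
          l1.foldl (fun s f1 => l2.foldl (fun s f2 =>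
              PySem.Set.add (PySem.Set.add s (PySem.Int.band f1 f2)) (PySem.Int.bor f1 f2)) s) s)
        new1
      (layers ++ [news], PySem.Set.update st.2 news))
    ([base], PySem.Set.ofList base)
  st.2

-- ===== PORT B =====
-- Source B's memoized top-down recursion layer(g); the memo dict is threaded through explicitly.
-- The second call layer(g-1-i) in Source B's inner loop is a memo hit after the first f1 iteration,
-- so it is evaluated once per i here, returning the identical memoized set.
def layerM (n : Int) (g : Nat) (memo : PySem.Dict Int (PySem.Set Int)) :
    PySem.Set Int × PySem.Dict Int (PySem.Set Int) :=
  match memo.get? (g : Int) with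
  | some r => (r, memo)
  | none =>
    match g with
    | 0 =>
      let r := pyBase n
      (r, memo.insert ((0 : Nat) : Int) r)
    | g' + 1 =>
      let pm := layerM n g' memo
      let nots := pm.1.foldl
        (fun s f => PySem.Set.add s
          (PySem.Int.bxor (((1 : Int) <<< ((1 : Int) <<< n.toNat).toNat) - 1) f))
        PySem.Set.empty
      let st := (List.range (g' + 1)).attach.foldl
        (fun (st : PySem.Set Int × PySem.Dict Int (PySem.Set Int)) i =>
          let p1 := layerM n i.1 st.2
          let p2 := layerM n (g' - i.1) p1.2
          (p1.1.foldl (fun s f1 => p2.1.foldl (fun s f2 =>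
              PySem.Set.add (PySem.Set.add s (PySem.Int.band f1 f2)) (PySem.Int.bor f1 f2)) s) st.1,
           p2.2))
        (nots, pm.2)
      (st.1, st.2.insert ((g' + 1 : Nat) : Int) st.1)
  termination_by g
  decreasing_by
  · omega
  · have := List.mem_range.mp i.2; omega
  · have := List.mem_range.mp i.2; omega

def all_functions_alt (n : Int) (max_gates : Int) : List Int :=
  let p0 := layerM n 0 PySem.Dict.empty
  let st := (PySem.List.pyRange 1 (max_gates + 1) 1).foldl
    (fun (st : PySem.Set Int × PySem.Dict Int (PySem.Set Int)) g =>
      let pg := layerM n g.toNat st.2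
      (PySem.Set.union st.1 pg.1, pg.2))
    (PySem.Set.ofList p0.1, p0.2)
  st.1

-- ===== PRECONDITION & SPEC =====
-- Pre_ excludes n < 0, on which Python A raises ValueError ("negative shift count" in 1 << (1 << n)).
def Pre_all_functions (n : Int) (max_gates : Int) : Prop := 0 ≤ n
instance (n : Int) (max_gates : Int) : Decidable (Pre_all_functions n max_gates) := by
  unfold Pre_all_functions; infer_instance
def pvWitness_all_functions : Int × Int := (1, 1)

def Spec_all_functions (n : Int) (max_gates : Int) (out : List Int) : Prop := out = all_functions_alt n max_gates
instance (n : Int) (max_gates : Int) (out : List Int) : Decidable (Spec_all_functions n max_gates out) := by unfold Spec_all_functions; infer_instance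

-- ===== CLAIM (what is proved, stated in full; the proofs are below) =====
def Claim_equal_all_functions : Prop := ∀ (n : Int) (max_gates : Int), Dom_all_functions n max_gates → Pre_all_functions n max_gates → Spec_all_functions n max_gates (all_functions n max_gates)

-- ===== LEMMAS AND PROOFS =====

-- pure (unmemoized) layer function: the mathematical value layerM computes; proof helper only
def layerB (n : Int) : Nat → PySem.Set Int
  | 0 => pyBase n
  | g + 1 =>
    let nots := (layerB n g).foldl
      (fun s f => PySem.Set.add s
        (PySem.Int.bxor (((1 : Int) <<< ((1 : Int) <<< n.toNat).toNat) - 1) f))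
      PySem.Set.empty
    (List.range (g + 1)).attach.foldl (fun s i =>
        (layerB n i.1).foldl (fun s f1 => (layerB n (g - i.1)).foldl (fun s f2 =>
            PySem.Set.add (PySem.Set.add s (PySem.Int.band f1 f2)) (PySem.Int.bor f1 f2)) s) s)
      nots
  termination_by g => g
  decreasing_by
  · omega
  · have := List.mem_range.mp i.2; omega
  · have := List.mem_range.mp i.2; omega

-- memo entries are always correct
def GoodMemo (n : Int) (memo : PySem.Dict Int (PySem.Set Int)) : Prop :=
  ∀ (g : Nat) (r : PySem.Set Int), memo.get? (g : Int) = some r → r = layerB n g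

lemma layerM_eq (n : Int) : ∀ (g : Nat) (memo : PySem.Dict Int (PySem.Set Int)),
    GoodMemo n memo → (layerM n g memo).1 = layerB n g ∧ GoodMemo n (layerM n g memo).2 := by
  intro g
  induction g using Nat.strong_induction_on with
  | _ g ih =>
    intro memo hmemo
    rw [layerM.eq_def]
    cases hm : memo.get? ((g : Nat) : Int) with
    | some r => exact ⟨hmemo g r hm, hmemo⟩
    | none =>
      cases g with
      | zero =>
        refine ⟨by rw [layerB], ?_⟩
        intro g' r hr
        by_cases hg : g' = 0
        · subst hg
          rw [PySem.Dict.get?_insert_self] at hr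
          cases hr; rw [layerB]
        · rw [PySem.Dict.get?_insert_of_ne _ _ (by simpa using hg)] at hr
          exact hmemo g' r hr
      | succ g' =>
        have hpm := ih g' (by omega) memo hmemo
        have hfold : ∀ (l : List {x // x ∈ List.range (g' + 1)}) (s : PySem.Set Int)
            (memo₁ : PySem.Dict Int (PySem.Set Int)), GoodMemo n memo₁ →
            (l.foldl (fun (st : PySem.Set Int × PySem.Dict Int (PySem.Set Int)) i =>
                let p1 := layerM n i.1 st.2
                let p2 := layerM n (g' - i.1) p1.2
                (p1.1.foldl (fun s f1 => p2.1.foldl (fun s f2 =>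
                    PySem.Set.add (PySem.Set.add s (PySem.Int.band f1 f2)) (PySem.Int.bor f1 f2)) s) st.1,
                 p2.2)) (s, memo₁)).1
              = l.foldl (fun s i =>
                  (layerB n i.1).foldl (fun s f1 => (layerB n (g' - i.1)).foldl (fun s f2 =>
                      PySem.Set.add (PySem.Set.add s (PySem.Int.band f1 f2)) (PySem.Int.bor f1 f2)) s) s) s
            ∧ GoodMemo n (l.foldl (fun (st : PySem.Set Int × PySem.Dict Int (PySem.Set Int)) i =>
                let p1 := layerM n i.1 st.2
                let p2 := layerM n (g' - i.1) p1.2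
                (p1.1.foldl (fun s f1 => p2.1.foldl (fun s f2 =>
                    PySem.Set.add (PySem.Set.add s (PySem.Int.band f1 f2)) (PySem.Int.bor f1 f2)) s) st.1,
                 p2.2)) (s, memo₁)).2 := by
          intro l
          induction l with
          | nil => intro s memo₁ h₁; exact ⟨rfl, h₁⟩
          | cons i t iht =>
            intro s memo₁ h₁
            have hi : i.1 < g' + 1 := List.mem_range.mp i.2
            have h1 := ih i.1 (by omega) memo₁ h₁
            have h2 := ih (g' - i.1) (by omega) _ h1.2
            simp only [List.foldl_cons]
            rw [h1.1, h2.1]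
            exact iht _ _ h2.2
        have hnots := hfold (List.range (g' + 1)).attach
          ((layerB n g').foldl
            (fun s f => PySem.Set.add s
              (PySem.Int.bxor (((1 : Int) <<< ((1 : Int) <<< n.toNat).toNat) - 1) f))
            PySem.Set.empty) (layerM n g' memo).2 hpm.2
        simp only [hpm.1]
        refine ⟨?_, ?_⟩
        · rw [hnots.1]
          conv_rhs => rw [layerB]
        · intro g₀ r hr
          by_cases hg : g₀ = g' + 1
          · subst hg
            rw [PySem.Dict.get?_insert_self] at hr
            cases hr
            rw [hnots.1]
            conv_rhs => rw [layerB]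
          · rw [PySem.Dict.get?_insert_of_ne _ _ (by intro h; exact hg (by exact_mod_cast h))] at hr
            exact hnots.2 g₀ r hr

lemma alt_eq_pure (n : Int) (max_gates : Int) :
    all_functions_alt n max_gates
      = (PySem.List.pyRange 1 (max_gates + 1) 1).foldl
          (fun acc g => PySem.Set.update acc (layerB n g.toNat))
          (PySem.Set.ofList (pyBase n)) := by
  have h0 : GoodMemo n (PySem.Dict.empty : PySem.Dict Int (PySem.Set Int)) := by
    intro g r hr; cases hr
  have hp0 := layerM_eq n 0 PySem.Dict.empty h0
  have hfold : ∀ (l : List Int) (acc : PySem.Set Int) (memo : PySem.Dict Int (PySem.Set Int)),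
      GoodMemo n memo →
      (l.foldl (fun (st : PySem.Set Int × PySem.Dict Int (PySem.Set Int)) g =>
          let pg := layerM n g.toNat st.2
          (PySem.Set.union st.1 pg.1, pg.2)) (acc, memo)).1
        = l.foldl (fun acc g => PySem.Set.update acc (layerB n g.toNat)) acc := by
    intro l
    induction l with
    | nil => intro acc memo h; rfl
    | cons x t iht =>
      intro acc memo h
      have hx := layerM_eq n x.toNat memo h
      simp only [List.foldl_cons]
      rw [hx.1]
      exact iht _ _ hx.2
  show ((PySem.List.pyRange 1 (max_gates + 1) 1).foldl _ (PySem.Set.ofList (layerM n 0 PySem.Dict.empty).1, (layerM n 0 PySem.Dict.empty).2)).1 = _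
  rw [hp0.1]
  have : layerB n 0 = pyBase n := by rw [layerB]
  rw [this]
  exact hfold _ _ _ hp0.2

-- A's loop body, named for the proofs
def stepA (n : Int) (st : List (PySem.Set Int) × PySem.Set Int) (g : Int) :
    List (PySem.Set Int) × PySem.Set Int :=
  let layers := st.1
  let prev := (PySem.List.pyGet? layers (-1)).getD PySem.Set.empty
  let new1 := prev.foldl
    (fun s f => PySem.Set.add s
      (PySem.Int.bxor (((1 : Int) <<< ((1 : Int) <<< n.toNat).toNat) - 1) f))
    PySem.Set.empty
  let news := (PySem.List.pyRange 0 g 1).foldl (fun s i =>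
      let l1 := (PySem.List.pyGet? layers i).getD PySem.Set.empty
      let l2 := (PySem.List.pyGet? layers (g - 1 - i)).getD PySem.Set.empty
      l1.foldl (fun s f1 => l2.foldl (fun s f2 =>
          PySem.Set.add (PySem.Set.add s (PySem.Int.band f1 f2)) (PySem.Int.bor f1 f2)) s) s)
    new1
  (layers ++ [news], PySem.Set.update st.2 news)

lemma all_functions_eq_stepA (n max_gates : Int) :
    all_functions n max_gates =
      ((PySem.List.pyRange 1 (max_gates + 1) 1).foldl (stepA n)
        ([pyBase n], PySem.Set.ofList (pyBase n))).2 := rfl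

lemma news_eq (n : Int) (j : Nat) :
    (List.range (j + 1)).foldl
      (fun s i =>
        ((PySem.List.pyGet? ((List.range (j + 1)).map (layerB n)) ((i : Nat) : Int)).getD PySem.Set.empty).foldl
          (fun s f1 =>
            ((PySem.List.pyGet? ((List.range (j + 1)).map (layerB n)) ((j : Int) + 1 - 1 - ((i : Nat) : Int))).getD PySem.Set.empty).foldl
              (fun s f2 => PySem.Set.add (PySem.Set.add s (PySem.Int.band f1 f2)) (PySem.Int.bor f1 f2)) s) s)
      ((layerB n j).foldl
        (fun s f => PySem.Set.add s
          (PySem.Int.bxor (((1 : Int) <<< ((1 : Int) <<< n.toNat).toNat) - 1) f))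
        PySem.Set.empty)
    = layerB n (j + 1) := by
  conv_rhs => rw [layerB]
  rw [List.foldl_attach (f := fun (s : PySem.Set Int) (i : Nat) =>
    List.foldl (fun s f1 =>
      List.foldl (fun s f2 => (PySem.Set.add s (PySem.Int.band f1 f2)).add (PySem.Int.bor f1 f2)) s
        (layerB n (j - i))) s (layerB n i))]
  refine (PySem.List.foldl_congr_mem _ _ _ _ ?_).symm
  intro acc i hi
  have hi' : i < j + 1 := List.mem_range.mp hi
  have h2 : ((j : Int) + 1 - 1 - (i : Int)) = ((j - i : Nat) : Int) := by omega
  rw [h2]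
  simp [hi']

lemma stepA_step (n : Int) (j : Nat) (acc : PySem.Set Int) :
    stepA n ((List.range (j + 1)).map (layerB n), acc) ((j : Int) + 1)
      = ((List.range (j + 2)).map (layerB n), PySem.Set.update acc (layerB n (j + 1))) := by
  have hprev : (PySem.List.pyGet? ((List.range (j + 1)).map (layerB n)) (-1)).getD PySem.Set.empty
      = layerB n j := by
    rw [PySem.List.pyGet?_neg_one]; simp [List.getLast?_eq_getElem?]
  have hrange : PySem.List.pyRange 0 ((j : Int) + 1) 1 = (List.range (j + 1)).map (fun k : Nat => (k : Int)) := by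
    have hc : ((j : Int) + 1) = ((j + 1 : Nat) : Int) := by push_cast; ring
    rw [hc]; exact PySem.List.pyRange_zero_natCast (j + 1)
  simp only [stepA, hprev, hrange, List.foldl_map]
  rw [news_eq n j]
  rw [show List.range (j + 2) = List.range (j + 1) ++ [j + 1] from List.range_succ, List.map_append]
  simp

lemma loopA (n : Int) (k : Nat) :
    (PySem.List.pyRange 1 ((k : Int) + 1) 1).foldl (stepA n)
        ([pyBase n], PySem.Set.ofList (pyBase n))
      = ((List.range (k + 1)).map (layerB n),
         (PySem.List.pyRange 1 ((k : Int) + 1) 1).foldl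
           (fun acc g => PySem.Set.update acc (layerB n g.toNat))
           (PySem.Set.ofList (pyBase n))) := by
  induction k with
  | zero =>
    rw [show (((0 : Nat) : Int) + 1) = 1 by norm_num,
        PySem.List.pyRange_one_eq_nil (le_refl 1)]
    simp [List.range_one, layerB]
  | succ k ih =>
    rw [show (((k + 1 : Nat) : Int) + 1) = (((k : Nat) : Int) + 1) + 1 by push_cast; ring,
        PySem.List.pyRange_one_succ_right (by omega)]
    rw [List.foldl_append, List.foldl_append, ih]
    simp only [List.foldl_cons, List.foldl_nil]
    rw [stepA_step n k]
    rw [show ((k : Int) + 1).toNat = k + 1 by omega]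

-- ===== VERDICT (by name: the statement is the Claim_ definition above) =====
theorem all_functions_spec : Claim_equal_all_functions := by
  intro n max_gates _ _
  show all_functions n max_gates = all_functions_alt n max_gates
  rw [all_functions_eq_stepA, alt_eq_pure]
  by_cases h : max_gates ≤ 0
  · rw [PySem.List.pyRange_one_eq_nil (by omega)]; rfl
  · have hk : max_gates = ((max_gates.toNat : Int)) := by omega
    rw [hk, loopA n max_gates.toNat]
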